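-- pv_equiv track=rewrite | github.com/cirosantilli/project-euler-solvers | solvers/338.py | divisor_summatory
-- ===== SOURCE A (Python) =====
-- def divisor_summatory(n: int, cache: dict[int, int]) -> int:
--     """
--     D(n) = sum_{k=1..n} floor(n/k)
--
--     Computed in O(sqrt(n)) using quotient grouping:
--         floor(n/k) is constant on k in [k, n//(n//k)].
--     """
--     if n <= 0:
--         return 0
--     v = cache.get(n)
--     if v is not None:
--         return v
--
--     s = 0
--     k = 1
--     while k <= n:
--         q = n // k
--         r = n // q
--         s += q * (r - k + 1)
--         k = r + 1
--
--     cache[n] = s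
--     return s
-- ===== SOURCE B (Python) =====
-- def divisor_summatory(n: int, cache: dict[int, int]) -> int:
--     """
--     D(n) = sum_{k=1..n} floor(n/k)
--
--     Dirichlet hyperbola method: D(n) = 2 * sum_{k=1..isqrt(n)} n//k - isqrt(n)**2.
--     """
--     if n <= 0:
--         return 0
--     v = cache.get(n)
--     if v is not None:
--         return v
--
--     total = 0
--     k = 1
--     while k * k <= n:
--         total += n // k
--         k += 1
--     s = k - 1  # s = isqrt(n)
--     total = 2 * total - s * s
--
--     cache[n] = total
--     return total
-- ===== Notes on version B (the rewrite author's own statement) =====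
-- stated objective: alternative
-- what changed: Replaces A's block-jumping quotient-grouping loop (q=n//k, r=n//q, k=r+1) with the Dirichlet hyperbola method: a flat loop accumulating n//k for k up to isqrt(n) and the closed-form correction 2*total - s*s.
import Mathlib
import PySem

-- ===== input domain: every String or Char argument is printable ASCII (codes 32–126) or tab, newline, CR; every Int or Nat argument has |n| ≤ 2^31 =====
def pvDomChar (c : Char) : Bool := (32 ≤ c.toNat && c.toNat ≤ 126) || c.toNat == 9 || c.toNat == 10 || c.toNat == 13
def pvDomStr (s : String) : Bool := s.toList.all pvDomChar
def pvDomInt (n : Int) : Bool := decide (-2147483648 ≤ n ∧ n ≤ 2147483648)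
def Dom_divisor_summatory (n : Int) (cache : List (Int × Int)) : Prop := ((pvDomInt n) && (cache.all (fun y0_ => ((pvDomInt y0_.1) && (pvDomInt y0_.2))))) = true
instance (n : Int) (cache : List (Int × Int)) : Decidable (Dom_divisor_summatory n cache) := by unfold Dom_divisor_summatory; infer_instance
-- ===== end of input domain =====

-- B computes D(n) = Σ_{k=1..n} n//k by the Dirichlet hyperbola method (flat loop to √n
-- plus the correction 2·Σ − s²) instead of A's block-jumping quotient grouping.
-- Both Pythons write cache[n] = result before returning; the equivalence proved here is
-- about the RETURN value only (A's and B's cache mutations are the same write anyway).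

-- ===== PORT A =====
-- A's while loop: q = n//k, r = n//q, s += q*(r-k+1), k = r+1, while k ≤ n.
-- On every reached state n > 0 and k ≥ 1, so all Python ints are nonnegative and
-- Python's // is exactly Nat division: the loop is carried in Nat (exact on this domain;
-- the `1 ≤ k` conjunct only totalises the unreachable k = 0 state).
def dsLoopA (n s k : Nat) : Nat :=
  if h : 1 ≤ k ∧ k ≤ n then
    let q := n / k
    let r := n / q
    dsLoopA n (s + q * (r - k + 1)) (r + 1)
  else s
termination_by n + 1 - k
decreasing_by
  have hq : 1 ≤ n / k := (Nat.one_le_div_iff h.1).2 h.2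
  have hkr : k ≤ n / (n / k) := by
    refine (Nat.le_div_iff_mul_le hq).2 ?_
    calc k * (n / k) = n / k * k := Nat.mul_comm _ _
    _ ≤ n := Nat.div_mul_le_self n k
  omega

def divisor_summatory (n : Int) (cache : List (Int × Int)) : Int :=
  if n ≤ 0 then 0
  else
    match (PySem.Dict.ofList cache).get? n with
    | some v => v
    | none => ((dsLoopA n.toNat 0 1 : Nat) : Int)

-- ===== PORT B =====
-- B's while loop: total += n//k, k += 1, while k*k ≤ n; afterwards s = k - 1 and the
-- result is 2*total - s*s. As in A's port, n > 0 and k ≥ 1 throughout, so the loop is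
-- carried in Nat (exact); the final subtraction is done in Int exactly as Python does.
def dsLoopB (n t k : Nat) : Nat × Nat :=
  if h : 1 ≤ k ∧ k * k ≤ n then
    dsLoopB n (t + n / k) (k + 1)
  else (t, k)
termination_by n + 1 - k
decreasing_by
  have : k ≤ k * k := Nat.le_mul_of_pos_left k h.1
  omega

def divisor_summatory_alt (n : Int) (cache : List (Int × Int)) : Int :=
  if n ≤ 0 then 0
  else
    match (PySem.Dict.ofList cache).get? n with
    | some v => v
    | none =>
      let p := dsLoopB n.toNat 0 1
      let s : Nat := p.2 - 1
      2 * (p.1 : Int) - (s : Int) * (s : Int)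

-- ===== PRECONDITION & SPEC =====
def Spec_divisor_summatory (n : Int) (cache : List (Int × Int)) (out : Int) : Prop := out = divisor_summatory_alt n cache
instance (n : Int) (cache : List (Int × Int)) (out : Int) : Decidable (Spec_divisor_summatory n cache out) := by unfold Spec_divisor_summatory; infer_instance

-- ===== CLAIM (what is proved, stated in full; the proofs are below) =====
def Claim_equal_divisor_summatory : Prop := ∀ (n : Int) (cache : List (Int × Int)), Dom_divisor_summatory n cache → Spec_divisor_summatory n cache (divisor_summatory n cache)

-- ===== LEMMAS AND PROOFS =====

-- A's loop adds exactly Σ_{j=k..n} n/j: on the block [k, n/(n/k)] the quotient n/j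
-- is constant, so each iteration contributes the whole block's part of the sum.
lemma dsLoopA_eq_aux (n : Nat) : ∀ m k s, n + 1 - k ≤ m → 1 ≤ k →
    dsLoopA n s k = s + ∑ j ∈ Finset.Icc k n, n / j := by
  intro m
  induction m with
  | zero =>
    intro k s hm hk
    rw [dsLoopA, Finset.Icc_eq_empty_of_lt (by omega : n < k)]
    simp
    omega
  | succ m ih =>
    intro k s hm hk
    rw [dsLoopA]
    by_cases hkn : k ≤ n
    · simp only [hk, hkn, and_self, dite_true]
      have hq : 1 ≤ n / k := (Nat.one_le_div_iff hk).2 hkn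
      have hkr : k ≤ n / (n / k) := by
        refine (Nat.le_div_iff_mul_le hq).2 ?_
        calc k * (n / k) = n / k * k := Nat.mul_comm _ _
        _ ≤ n := Nat.div_mul_le_self n k
      have hrn : n / (n / k) ≤ n := Nat.div_le_self _ _
      rw [ih _ _ (by omega) (by omega)]
      have hconst : ∀ j ∈ Finset.Icc k (n / (n / k)), n / j = n / k := by
        intro j hj
        rw [Finset.mem_Icc] at hj
        have h1 : n / j ≤ n / k := Nat.div_le_div_left hj.1 hk
        have h2 : n / k ≤ n / j := by
          refine (Nat.le_div_iff_mul_le (by omega)).2 ?_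
          calc n / k * j = j * (n / k) := Nat.mul_comm _ _
          _ ≤ n := (Nat.le_div_iff_mul_le hq).1 hj.2
        omega
      have hsplit : ∑ j ∈ Finset.Icc k n, n / j
          = (∑ j ∈ Finset.Icc k (n / (n / k)), n / j) + ∑ j ∈ Finset.Icc (n / (n / k) + 1) n, n / j := by
        rw [← Finset.Ico_add_one_right_eq_Icc k n, ← Finset.Ico_add_one_right_eq_Icc k (n / (n / k)),
          ← Finset.Ico_add_one_right_eq_Icc (n / (n / k) + 1) n,
          Finset.sum_Ico_consecutive _ (by omega) (by omega)]
      rw [hsplit, Finset.sum_congr rfl hconst, Finset.sum_const, Nat.card_Icc, smul_eq_mul]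
      have : n / k * (n / (n / k) - k + 1) = (n / (n / k) + 1 - k) * (n / k) := by
        rw [Nat.mul_comm]; congr 1; omega
      omega
    · simp only [hkn, and_false, dite_false]
      rw [Finset.Icc_eq_empty_of_lt (by omega)]
      simp

-- B's loop sums n/j for j = k..√n and stops with k = √n + 1.
lemma dsLoopB_eq_aux (n : Nat) : ∀ m k t, Nat.sqrt n + 1 - k ≤ m → 1 ≤ k → k ≤ Nat.sqrt n + 1 →
    dsLoopB n t k = (t + ∑ j ∈ Finset.Icc k (Nat.sqrt n), n / j, Nat.sqrt n + 1) := by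
  intro m
  induction m with
  | zero =>
    intro k t hm hk hks
    have hke : k = Nat.sqrt n + 1 := by omega
    have hgt : ¬ k * k ≤ n := by
      rw [hke]; exact Nat.not_le.2 (Nat.lt_succ_sqrt n)
    rw [dsLoopB]
    simp only [hk, hgt, and_false, dite_false]
    rw [Finset.Icc_eq_empty_of_lt (by omega)]
    simp [hke]
  | succ m ih =>
    intro k t hm hk hks
    rw [dsLoopB]
    by_cases hkk : k * k ≤ n
    · simp only [hk, hkk, and_self, dite_true]
      have hksq : k ≤ Nat.sqrt n := Nat.le_sqrt.2 hkk
      rw [ih _ _ (by omega) (by omega) (by omega)]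
      have hsplit : ∑ j ∈ Finset.Icc k (Nat.sqrt n), n / j
          = n / k + ∑ j ∈ Finset.Icc (k + 1) (Nat.sqrt n), n / j := by
        rw [← Finset.Ico_add_one_right_eq_Icc k (Nat.sqrt n),
          ← Finset.Ico_add_one_right_eq_Icc (k + 1) (Nat.sqrt n),
          ← Finset.sum_Ico_consecutive _ (by omega : k ≤ k + 1) (by omega)]
        simp
      rw [hsplit]
      simp [Nat.add_assoc]
    · simp only [hkk, and_false, dite_false]
      have : Nat.sqrt n < k := Nat.sqrt_lt'.2 (by rw [pow_two]; omega)
      have hke : k = Nat.sqrt n + 1 := by omega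
      rw [Finset.Icc_eq_empty_of_lt (by omega)]
      simp [hke]

lemma filter_le_Icc (a b m : ℕ) (hm : m ≤ b) :
    (Finset.Icc a b).filter (fun x => x ≤ m) = Finset.Icc a m := by
  ext x; simp only [Finset.mem_filter, Finset.mem_Icc]; omega

-- Dirichlet hyperbola identity in subtraction-free form: the tail Σ_{k>√n} n/k is
-- double-counted against the quotients q ≤ √n.
lemma hyperbola (n : Nat) :
    2 * ∑ j ∈ Finset.Icc 1 (Nat.sqrt n), n / j
      = (∑ j ∈ Finset.Icc 1 n, n / j) + Nat.sqrt n * Nat.sqrt n := by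
  set s := Nat.sqrt n with hs
  have hsn : s ≤ n := Nat.sqrt_le_self n
  have hss : s * s ≤ n := by simpa [pow_two] using Nat.sqrt_le' n
  have hlt : n < (s + 1) * (s + 1) := Nat.lt_succ_sqrt n
  have hbig : ∀ q, 1 ≤ q → q ≤ s → s ≤ n / q := by
    intro q h1 h2
    refine (Nat.le_div_iff_mul_le (by omega)).2 ?_
    calc s * q ≤ s * s := Nat.mul_le_mul_left s h2
    _ ≤ n := hss
  have tail : ∑ k ∈ Finset.Icc (s + 1) n, n / k
      = ∑ q ∈ Finset.Icc 1 s, (n / q - s) := by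
    have small : ∀ k ∈ Finset.Icc (s + 1) n, n / k ≤ s := by
      intro k hk
      rw [Finset.mem_Icc] at hk
      have : n / k < s + 1 := (Nat.div_lt_iff_lt_mul (by omega)).2
        (lt_of_lt_of_le hlt (Nat.mul_le_mul_left _ hk.1))
      omega
    have expand : ∀ k ∈ Finset.Icc (s + 1) n, n / k
        = ∑ q ∈ Finset.Icc 1 s, if q ≤ n / k then 1 else 0 := by
      intro k hk
      rw [Finset.sum_boole, filter_le_Icc 1 s (n / k) (small k hk), Nat.card_Icc]
      simp
    rw [Finset.sum_congr rfl expand, Finset.sum_comm]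
    refine Finset.sum_congr rfl ?_
    intro q hq
    rw [Finset.mem_Icc] at hq
    have hcond : ∀ k ∈ Finset.Icc (s + 1) n, (q ≤ n / k) ↔ (k ≤ n / q) := by
      intro k hk
      rw [Finset.mem_Icc] at hk
      have h1 : q ≤ n / k ↔ q * k ≤ n := Nat.le_div_iff_mul_le (by omega)
      have h2 : k ≤ n / q ↔ k * q ≤ n := Nat.le_div_iff_mul_le (by omega)
      rw [h1, h2, Nat.mul_comm]
    rw [Finset.sum_congr rfl (fun k hk => if_congr (hcond k hk) rfl rfl)]
    rw [Finset.sum_boole, filter_le_Icc (s + 1) n (n / q) (Nat.div_le_self n q), Nat.card_Icc]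
    simp only [Nat.cast_id]
    omega
  have split : ∑ j ∈ Finset.Icc 1 n, n / j
      = (∑ j ∈ Finset.Icc 1 s, n / j) + ∑ j ∈ Finset.Icc (s + 1) n, n / j := by
    rw [← Finset.Ico_add_one_right_eq_Icc 1 n, ← Finset.Ico_add_one_right_eq_Icc 1 s,
      ← Finset.Ico_add_one_right_eq_Icc (s + 1) n,
      Finset.sum_Ico_consecutive _ (by omega) (by omega)]
  have hcard : (Finset.Icc 1 s).card = s := by rw [Nat.card_Icc]; omega
  have untail : (∑ q ∈ Finset.Icc 1 s, (n / q - s)) + s * s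
      = ∑ q ∈ Finset.Icc 1 s, n / q := by
    calc (∑ q ∈ Finset.Icc 1 s, (n / q - s)) + s * s
        = (∑ q ∈ Finset.Icc 1 s, (n / q - s)) + ∑ _q ∈ Finset.Icc 1 s, s := by
          rw [Finset.sum_const, smul_eq_mul, hcard]
    _ = ∑ q ∈ Finset.Icc 1 s, (n / q - s + s) := Finset.sum_add_distrib.symm
    _ = ∑ q ∈ Finset.Icc 1 s, n / q := Finset.sum_congr rfl (fun q hq => by
          rw [Finset.mem_Icc] at hq; have := hbig q hq.1 hq.2; omega)
  rw [split, tail]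
  omega

-- ===== VERDICT (by name: the statement is the Claim_ definition above) =====
theorem divisor_summatory_spec : Claim_equal_divisor_summatory := by
  intro n cache _
  unfold Spec_divisor_summatory divisor_summatory divisor_summatory_alt
  by_cases hn : n ≤ 0
  · simp [hn]
  · simp only [hn, if_false]
    cases (PySem.Dict.ofList cache).get? n with
    | some v => rfl
    | none =>
      rw [dsLoopA_eq_aux n.toNat (n.toNat + 1 - 1) 1 0 le_rfl le_rfl,
        dsLoopB_eq_aux n.toNat (Nat.sqrt n.toNat + 1 - 1) 1 0 le_rfl le_rfl (by omega)]
      have h := hyperbola n.toNat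
      simp only [Nat.zero_add, Nat.add_sub_cancel]
      zify at h
      push_cast
      linarith
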